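-- pv_equiv track=rewrite | github.com/MBZUAI-Paris/dialogforge | src/dlgforge/pipeline/sampling.py | _extract_seed_topics_from_legacy_nested
-- ===== SOURCE A (Python) =====
-- from typing import Any, Dict, List
--
-- _FINAL_VARIANT_FALLBACK = "english"
--
-- def _extract_seed_topics_from_legacy_nested(data: Dict[str, Any], variant: str) -> Dict[str, List[str]]:
--     # Keep backward compatibility with old schema:
--     # {topic: {language_variant: [questions]}}
--     seed_topics: Dict[str, List[str]] = {}
--     fallback_variant = _FINAL_VARIANT_FALLBACK
--     for topic, per_lang in data.items():
--         if not isinstance(per_lang, dict):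
--             continue
--
--         questions = per_lang.get(variant)
--         if not isinstance(questions, list):
--             questions = per_lang.get(fallback_variant)
--         if not isinstance(questions, list):
--             # Last fallback: first available list in this topic block.
--             for _, value in per_lang.items():
--                 if isinstance(value, list):
--                     questions = value
--                     break
--
--         if not isinstance(questions, list):
--             continue
--
--         cleaned = [q.strip() for q in questions if isinstance(q, str) and q.strip()]
--         if cleaned:
--             seed_topics[str(topic)] = cleaned
--     return seed_topics
-- ===== SOURCE B (Python) =====
-- from typing import Any, Dict, List
--
-- _FINAL_VARIANT_FALLBACK = "english"
--
--
-- def _extract_seed_topics_from_legacy_nested(data: Dict[str, Any], variant: str) -> Dict[str, List[str]]: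
--     # Single-pass priority selection: instead of staged lookups, scan each topic's
--     # items once, keeping the list value whose key has the best rank
--     # (variant < fallback < anything), ties broken by first occurrence.
--     seed_topics: Dict[str, List[str]] = {}
--     for topic, per_lang in data.items():
--         if not isinstance(per_lang, dict):
--             continue
--         best_rank = 3
--         best = None
--         for key, value in per_lang.items():
--             if not isinstance(value, list):
--                 continue
--             if key == variant:
--                 rank = 0
--             elif key == _FINAL_VARIANT_FALLBACK:
--                 rank = 1
--             else:
--                 rank = 2
--             if rank < best_rank:
--                 best_rank = rank
--                 best = value
--                 if rank == 0:
--                     break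
--         if best is None:
--             continue
--         cleaned = list(filter(None, (q.strip() for q in best if isinstance(q, str))))
--         if cleaned:
--             seed_topics[str(topic)] = cleaned
--     return seed_topics
-- ===== Notes on version B (the rewrite author's own statement) =====
-- stated objective: alternative
-- what changed: Replaces A's staged variant/fallback/first-list lookup cascade (two .get calls plus a values scan) with a single pass over each topic's items that keeps the list value of minimal key rank (variant < 'english' < other, first occurrence wins, early exit on an exact variant match).
import Mathlib
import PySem

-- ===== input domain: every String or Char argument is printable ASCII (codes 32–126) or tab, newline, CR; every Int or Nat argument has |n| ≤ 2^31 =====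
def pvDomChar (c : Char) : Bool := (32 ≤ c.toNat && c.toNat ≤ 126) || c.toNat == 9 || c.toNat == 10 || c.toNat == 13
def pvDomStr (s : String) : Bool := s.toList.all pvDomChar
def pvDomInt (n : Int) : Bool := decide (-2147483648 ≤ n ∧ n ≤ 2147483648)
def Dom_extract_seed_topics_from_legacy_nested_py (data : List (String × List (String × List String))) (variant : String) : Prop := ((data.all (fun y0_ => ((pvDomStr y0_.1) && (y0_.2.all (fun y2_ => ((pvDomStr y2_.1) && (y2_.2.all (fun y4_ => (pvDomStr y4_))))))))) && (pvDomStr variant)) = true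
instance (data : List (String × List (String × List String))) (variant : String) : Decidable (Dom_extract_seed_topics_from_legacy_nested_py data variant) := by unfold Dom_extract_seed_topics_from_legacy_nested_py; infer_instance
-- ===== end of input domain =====

-- B replaces A's staged variant/fallback/first-value lookup cascade with a single
-- rank-minimizing scan over each topic's items (objective: alternative decomposition, same cost).


-- ===== PORT A =====
-- Literal transliteration of A: for each topic, try per_lang.get(variant), then
-- per_lang.get("english"), then the first list among per_lang's values (under this type
-- every present value is a list, so each isinstance(…, list) test holds exactly for
-- present values); clean by comprehension (filter, then strip); insert if non-empty.
def extract_seed_topics_from_legacy_nested_py (data : List (String × List (String × List String))) (variant : String) : List (String × List String) :=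
  (data.foldl (fun (acc : PySem.Dict String (List String)) tp =>
      let perLang := PySem.Dict.ofList tp.2
      let q1 := perLang.get? variant
      let q2 := match q1 with | some l => some l | none => perLang.get? "english"
      -- last fallback: first value that is a list — every value is a list, so the first value
      let q3 := match q2 with | some l => some l | none => perLang.values.head?
      match q3 with
      | none => acc
      | some qs =>
        let cleaned := (qs.filter (fun q => PySem.Str.strip q ≠ "")).map PySem.Str.strip
        if cleaned = [] then acc else acc.insert tp.1 cleaned)
    PySem.Dict.empty).items

-- ===== PORT B =====
-- rank(key): 0 for the variant, 1 for the "english" fallback, 2 otherwise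
def pvRank (k variant : String) : Nat :=
  if k = variant then 0 else if k = "english" then 1 else 2

-- the inner for-loop of B: keep the best-ranked value seen so far, break at rank 0
-- (the isinstance(value, list) guard holds for every present value under this type)
def pvBest (variant : String) : List (String × List String) → Nat → Option (List String) → Option (List String)
  | [], _, best => best
  | (k, v) :: rest, bestRank, best =>
    let r := pvRank k variant
    if r < bestRank then
      if r = 0 then some v else pvBest variant rest r (some v)
    else pvBest variant rest bestRank best

def extract_seed_topics_from_legacy_nested_py_alt (data : List (String × List (String × List String))) (variant : String) : List (String × List String) :=
  (data.foldl (fun (acc : PySem.Dict String (List String)) tp =>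
      match pvBest variant (PySem.Dict.ofList tp.2).items 3 none with
      | none => acc
      | some best =>
        -- list(filter(None, (q.strip() for q in best))): strip all, then drop empties
        let cleaned := (best.map PySem.Str.strip).filter (fun s => s ≠ "")
        if cleaned = [] then acc else acc.insert tp.1 cleaned)
    PySem.Dict.empty).items

-- ===== PRECONDITION & SPEC =====
def Spec_extract_seed_topics_from_legacy_nested_py (data : List (String × List (String × List String))) (variant : String) (out : List (String × List String)) : Prop := out = extract_seed_topics_from_legacy_nested_py_alt data variant
instance (data : List (String × List (String × List String))) (variant : String) (out : List (String × List String)) : Decidable (Spec_extract_seed_topics_from_legacy_nested_py data variant out) := by unfold Spec_extract_seed_topics_from_legacy_nested_py; infer_instance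

-- ===== CLAIM (what is proved, stated in full; the proofs are below) =====
def Claim_equal_extract_seed_topics_from_legacy_nested_py : Prop := ∀ (data : List (String × List (String × List String))) (variant : String), Dom_extract_seed_topics_from_legacy_nested_py data variant → Spec_extract_seed_topics_from_legacy_nested_py data variant (extract_seed_topics_from_legacy_nested_py data variant)

-- ===== LEMMAS AND PROOFS =====
-- first-match lookup on a raw association list
def pvLkp : List (String × List String) → String → Option (List String)
  | [], _ => none
  | (k, v) :: rest, x => if k = x then some v else pvLkp rest x

theorem pv_get?_eq_lkp (d : PySem.Dict String (List String)) (x : String) :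
    d.get? x = pvLkp d.items x := by
  obtain ⟨l⟩ := d
  induction l with
  | nil => rfl
  | cons p rest ih =>
    obtain ⟨k, v⟩ := p
    rw [PySem.Dict.get?_mk_cons]
    show _ = pvLkp ((k, v) :: rest) x
    rw [pvLkp]
    simp only [beq_iff_eq, ih]

theorem pvBest_state1 (variant : String) (l : List (String × List String)) (b : List String) :
    pvBest variant l 1 (some b)
      = match pvLkp l variant with | some x => some x | none => some b := by
  induction l generalizing b with
  | nil => rfl
  | cons p rest ih =>
    obtain ⟨k, v⟩ := p
    rw [pvBest, pvLkp]
    by_cases hv : k = variant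
    · simp [pvRank, hv]
    · by_cases he : k = "english"
      · subst he
        simp [pvRank, hv, ih]
      · simp [pvRank, hv, he, ih]

theorem pvBest_state2 (variant : String) (l : List (String × List String)) (b : List String) :
    pvBest variant l 2 (some b)
      = match pvLkp l variant with
        | some x => some x
        | none => match pvLkp l "english" with | some x => some x | none => some b := by
  induction l generalizing b with
  | nil => rfl
  | cons p rest ih =>
    obtain ⟨k, v⟩ := p
    rw [pvBest, pvLkp, pvLkp]
    by_cases hv : k = variant
    · simp [pvRank, hv]
    · by_cases he : k = "english"
      · subst he
        simp [pvRank, hv, pvBest_state1]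
      · simp [pvRank, hv, he, ih]

theorem pvBest_spec (variant : String) (l : List (String × List String)) :
    pvBest variant l 3 none
      = match pvLkp l variant with
        | some x => some x
        | none => match pvLkp l "english" with
          | some x => some x
          | none => (l.map (·.2)).head? := by
  induction l with
  | nil => rfl
  | cons p rest ih =>
    obtain ⟨k, v⟩ := p
    rw [pvBest, pvLkp, pvLkp]
    by_cases hv : k = variant
    · simp [pvRank, hv]
    · by_cases he : k = "english"
      · subst he
        simp [pvRank, hv, pvBest_state1]
      · simp [pvRank, hv, he, pvBest_state2]

theorem pv_step_eq (variant : String) (acc : PySem.Dict String (List String))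
    (tp : String × List (String × List String)) :
    (let perLang := PySem.Dict.ofList tp.2
     let q1 := perLang.get? variant
     let q2 := match q1 with | some l => some l | none => perLang.get? "english"
     let q3 := match q2 with | some l => some l | none => perLang.values.head?
     match q3 with
     | none => acc
     | some qs =>
       let cleaned := (qs.filter (fun q => PySem.Str.strip q ≠ "")).map PySem.Str.strip
       if cleaned = [] then acc else acc.insert tp.1 cleaned)
    = (match pvBest variant (PySem.Dict.ofList tp.2).items 3 none with
       | none => acc
       | some best =>
         let cleaned := (best.map PySem.Str.strip).filter (fun s => s ≠ "")
         if cleaned = [] then acc else acc.insert tp.1 cleaned) := by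
  have hclean : ∀ qs : List String,
      (qs.filter (fun q => PySem.Str.strip q ≠ "")).map PySem.Str.strip
        = (qs.map PySem.Str.strip).filter (fun s => s ≠ "") := by
    intro qs
    rw [List.filter_map]
    rfl
  rw [pvBest_spec]
  simp only [pv_get?_eq_lkp, PySem.Dict.values, hclean]
  cases pvLkp (PySem.Dict.ofList tp.2).items variant with
  | some x => rfl
  | none =>
    cases pvLkp (PySem.Dict.ofList tp.2).items "english" with
    | some x => rfl
    | none => cases ((PySem.Dict.ofList tp.2).items.map (·.2)).head? <;> rfl

theorem pv_fold_eq (variant : String) (data : List (String × List (String × List String)))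
    (acc : PySem.Dict String (List String)) :
    data.foldl (fun (acc : PySem.Dict String (List String)) tp =>
      let perLang := PySem.Dict.ofList tp.2
      let q1 := perLang.get? variant
      let q2 := match q1 with | some l => some l | none => perLang.get? "english"
      let q3 := match q2 with | some l => some l | none => perLang.values.head?
      match q3 with
      | none => acc
      | some qs =>
        let cleaned := (qs.filter (fun q => PySem.Str.strip q ≠ "")).map PySem.Str.strip
        if cleaned = [] then acc else acc.insert tp.1 cleaned) acc
    = data.foldl (fun (acc : PySem.Dict String (List String)) tp =>
        match pvBest variant (PySem.Dict.ofList tp.2).items 3 none with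
        | none => acc
        | some best =>
          let cleaned := (best.map PySem.Str.strip).filter (fun s => s ≠ "")
          if cleaned = [] then acc else acc.insert tp.1 cleaned) acc := by
  induction data generalizing acc with
  | nil => rfl
  | cons tp rest ih =>
    rw [List.foldl_cons, List.foldl_cons, pv_step_eq]
    exact ih _

-- ===== VERDICT (by name: the statement is the Claim_ definition above) =====
theorem extract_seed_topics_from_legacy_nested_py_spec : Claim_equal_extract_seed_topics_from_legacy_nested_py := by
  intro data variant _
  show _ = _
  unfold extract_seed_topics_from_legacy_nested_py extract_seed_topics_from_legacy_nested_py_alt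
  rw [pv_fold_eq]
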